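-- pv_equiv track=rewrite | github.com/hanwgyu/CTCI_solution | Leetcode/Create_Sorted_Array_through_Instructions.py | createSortedArray_1
-- ===== SOURCE A (Python) =====
-- from typing import List
--
-- import bisect
--
-- def createSortedArray_1(instructions: List[int]) -> int:
--     a = [instructions[0]]
--     d = {instructions[0]: 1}
--     ans = 0
--     for i in range(1, len(instructions)):
--         e = instructions[i]
--         j = bisect.bisect_left(a, e)
--         if j < len(a) and a[j] == e:
--             ans += min(sum(d[e] for e in a[:j]), sum(d[e] for e in a[j + 1 :]))
--             d[e] += 1
--         else:
--             ans += min(sum(d[e] for e in a[:j]), sum(d[e] for e in a[j:]))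
--             a.insert(j, e)
--             d[e] = 1
--     return ans % (pow(10, 9) + 7)
-- ===== SOURCE B (Python) =====
-- from typing import List
--
--
-- def createSortedArray_1(instructions: List[int]) -> int:
--     ans = 0
--     for i in range(1, len(instructions)):
--         e = instructions[i]
--         prefix = instructions[:i]
--         less = sum(1 for x in prefix if x < e)
--         greater = sum(1 for x in prefix if x > e)
--         ans += min(less, greater)
--     return ans % (10 ** 9 + 7)
-- ===== Notes on version B (the rewrite author's own statement) =====
-- stated objective: simpler
-- what changed: Replaced the incrementally maintained sorted-distinct list + count dict with a direct per-position scan of the prefix counting strictly smaller and strictly larger earlier elements; same O(n^2) cost, far shorter and with no auxiliary data structures.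
import Mathlib
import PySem

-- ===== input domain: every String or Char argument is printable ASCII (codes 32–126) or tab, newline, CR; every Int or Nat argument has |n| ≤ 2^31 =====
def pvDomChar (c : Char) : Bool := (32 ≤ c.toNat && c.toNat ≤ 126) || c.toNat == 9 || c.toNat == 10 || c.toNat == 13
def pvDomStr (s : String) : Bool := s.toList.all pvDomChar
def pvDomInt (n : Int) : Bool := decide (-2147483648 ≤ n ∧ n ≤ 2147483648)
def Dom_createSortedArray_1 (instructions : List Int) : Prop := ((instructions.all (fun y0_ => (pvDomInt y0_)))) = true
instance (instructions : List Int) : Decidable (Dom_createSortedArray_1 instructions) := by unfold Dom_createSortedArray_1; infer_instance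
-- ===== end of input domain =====

-- B replaces A's incrementally maintained sorted-distinct list + count dict with a direct
-- per-position scan of the prefix (objective: simpler; same asymptotic cost).

-- ===== PORT A =====
-- one iteration of A's 'for i in range(1, len(instructions))' loop; state = (a, d, ans)
def pvStepA (l : List Int) (st : List Int × PySem.Dict Int Int × Int) (i : Int) :
    List Int × PySem.Dict Int Int × Int :=
  match st with
  | (a, d, ans) =>
    let e := PySem.List.pyGetD l i 0
    let j := PySem.List.bisectLeft a e
    if j < a.length ∧ PySem.List.pyGetD a (j : Int) 0 = e then
      let ans := ans + min (((PySem.List.slice a none (some (j : Int))).map (fun v => d.getD v 0)).sum)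
                           (((PySem.List.slice a (some ((j : Int) + 1)) none).map (fun v => d.getD v 0)).sum)
      let d := d.insert e (d.getD e 0 + 1)
      (a, d, ans)
    else
      let ans := ans + min (((PySem.List.slice a none (some (j : Int))).map (fun v => d.getD v 0)).sum)
                           (((PySem.List.slice a (some (j : Int)) none).map (fun v => d.getD v 0)).sum)
      let a := PySem.List.insert a (j : Int) e
      let d := d.insert e 1
      (a, d, ans)

def createSortedArray_1 (instructions : List Int) : Int :=
  let x0 := PySem.List.pyGetD instructions 0 0
  let st := (PySem.List.pyRange 1 (instructions.length : Int) 1).foldl (pvStepA instructions)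
              ([x0], PySem.Dict.ofList [(x0, 1)], 0)
  PySem.Int.mod st.2.2 (10 ^ 9 + 7)

-- ===== PORT B =====
-- one iteration of B's loop: count strictly smaller / strictly larger elements of the prefix
def pvStepB (l : List Int) (ans : Int) (i : Int) : Int :=
  let e := PySem.List.pyGetD l i 0
  let pfx := PySem.List.slice l none (some i)
  let less : Int := ((pfx.filter (fun x => decide (x < e))).map (fun _ => (1 : Int))).sum
  let greater : Int := ((pfx.filter (fun x => decide (x > e))).map (fun _ => (1 : Int))).sum
  ans + min less greater

def createSortedArray_1_alt (instructions : List Int) : Int :=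
  let ans := (PySem.List.pyRange 1 (instructions.length : Int) 1).foldl (pvStepB instructions) 0
  PySem.Int.mod ans (10 ^ 9 + 7)

-- ===== PRECONDITION & SPEC =====
-- A raises IndexError on the empty list (instructions[0]); that is the only exception.
def Pre_createSortedArray_1 (instructions : List Int) : Prop := instructions ≠ []
instance (instructions : List Int) : Decidable (Pre_createSortedArray_1 instructions) := by
  unfold Pre_createSortedArray_1; infer_instance
def pvWitness_createSortedArray_1 : List Int := [1, 5, 6, 2]

def Spec_createSortedArray_1 (instructions : List Int) (out : Int) : Prop := out = createSortedArray_1_alt instructions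
instance (instructions : List Int) (out : Int) : Decidable (Spec_createSortedArray_1 instructions out) := by unfold Spec_createSortedArray_1; infer_instance

-- ===== CLAIM (what is proved, stated in full; the proofs are below) =====
def Claim_equal_createSortedArray_1 : Prop := ∀ (instructions : List Int), Dom_createSortedArray_1 instructions → Pre_createSortedArray_1 instructions → Spec_createSortedArray_1 instructions (createSortedArray_1 instructions)
-- ===== LEMMAS AND PROOFS =====

lemma pv_sum_count (a : List Int) (q : Int → Bool) (p : List Int) (hnd : a.Nodup)
    (hsub : ∀ x ∈ p, x ∈ a) :
    ((a.filter q).map (fun v => (p.count v : Int))).sum = (p.countP q : Int) := by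
  induction p with
  | nil => simp
  | cons x p ih =>
    have hx : x ∈ a := hsub x (List.mem_cons_self)
    have hsub' : ∀ y ∈ p, y ∈ a := fun y hy => hsub y (List.mem_cons_of_mem _ hy)
    have h1 : ((a.filter q).map (fun v => ((x :: p).count v : Int))).sum
        = ((a.filter q).map (fun v => (p.count v : Int))).sum
          + ((a.filter q).map (fun v => if v = x then (1:Int) else 0)).sum := by
      rw [← List.sum_map_add]
      apply congrArg
      apply List.map_congr_left
      intro v _
      rw [List.count_cons]
      by_cases h : v = x
      · simp [h]
      · simp [h, Ne.symm h]
    have h2 : ((a.filter q).map (fun v => if v = x then (1:Int) else 0)).sum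
        = if q x then 1 else 0 := by
      have hndf : (a.filter q).Nodup := hnd.filter q
      by_cases hqx : q x
      · have hxf : x ∈ a.filter q := List.mem_filter.mpr ⟨hx, hqx⟩
        have hc : (a.filter q).count x = 1 := by
          rw [List.count_eq_one_of_mem hndf hxf]
        calc ((a.filter q).map (fun v => if v = x then (1:Int) else 0)).sum
            = ((a.filter q).count x : Int) := by
              rw [List.count_eq_countP]
              rw [← PySem.List.sum_map_ite_one_zero (fun v => v == x)]
              apply congrArg; apply List.map_congr_left; intro v _; simp
          _ = if q x then 1 else 0 := by rw [hc]; simp [hqx]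
      · have : ∀ v ∈ a.filter q, (if v = x then (1:Int) else 0) = 0 := by
          intro v hv
          have := List.mem_filter.mp hv
          have : v ≠ x := by rintro rfl; exact hqx this.2
          simp [this]
        rw [List.map_congr_left this]
        simp [hqx]
    rw [List.countP_cons, h1, h2, ih hsub']
    push_cast
    by_cases hqx : q x <;> simp [hqx]


lemma pv_take_bisect (a : List Int) (e : Int) (hs : a.Pairwise (· < ·)) :
    a.take (PySem.List.bisectLeft a e) = a.filter (fun x => decide (x < e)) := by
  set j := PySem.List.bisectLeft a e with hj
  obtain ⟨hjle, hlt, hge⟩ := PySem.List.bisectLeft_spec a e (hs.imp le_of_lt)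
  have h1 : (a.take j).filter (fun x => decide (x < e)) = a.take j := by
    apply List.filter_eq_self.mpr
    intro x hx
    obtain ⟨i, hi, rfl⟩ := List.mem_iff_getElem.mp hx
    have hi' : i < a.length := lt_of_lt_of_le (lt_of_lt_of_le hi (by simp)) (le_refl _)
    rw [List.getElem_take]
    have : i < j := lt_of_lt_of_le hi (by simp [List.length_take])
    exact decide_eq_true (hlt i hi' this)
  have h2 : (a.drop j).filter (fun x => decide (x < e)) = [] := by
    apply List.filter_eq_nil_iff.mpr
    intro x hx
    obtain ⟨i, hi, rfl⟩ := List.mem_iff_getElem.mp hx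
    rw [List.getElem_drop]
    have hji : j + i < a.length := by have := hi; simp [List.length_drop] at this; omega
    have := hge (j + i) hji (Nat.le_add_right _ _)
    simp; omega
  calc a.take j = (a.take j).filter (fun x => decide (x < e)) ++ (a.drop j).filter (fun x => decide (x < e)) := by
        rw [h1, h2, List.append_nil]
    _ = a.filter (fun x => decide (x < e)) := by rw [← List.filter_append, List.take_append_drop]

lemma pv_drop_bisect_not_mem (a : List Int) (e : Int) (hs : a.Pairwise (· < ·)) (he : e ∉ a) :
    a.drop (PySem.List.bisectLeft a e) = a.filter (fun x => decide (e < x)) := by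
  set j := PySem.List.bisectLeft a e with hj
  obtain ⟨hjle, hlt, hge⟩ := PySem.List.bisectLeft_spec a e (hs.imp le_of_lt)
  have h1 : (a.take j).filter (fun x => decide (e < x)) = [] := by
    apply List.filter_eq_nil_iff.mpr
    intro x hx
    obtain ⟨i, hi, rfl⟩ := List.mem_iff_getElem.mp hx
    have hi' : i < a.length := lt_of_lt_of_le hi (by simp [List.length_take])
    rw [List.getElem_take]
    have : i < j := lt_of_lt_of_le hi (by simp [List.length_take])
    have := hlt i hi' this
    simp; omega
  have h2 : (a.drop j).filter (fun x => decide (e < x)) = a.drop j := by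
    apply List.filter_eq_self.mpr
    intro x hx
    obtain ⟨i, hi, rfl⟩ := List.mem_iff_getElem.mp hx
    have hji : j + i < a.length := by have := hi; simp [List.length_drop] at this; omega
    rw [List.getElem_drop]
    have h1 := hge (j + i) hji (Nat.le_add_right _ _)
    have h2 : a[j + i] ≠ e := by
      intro hcontra
      exact he (hcontra ▸ List.getElem_mem hji)
    simp; omega
  calc a.drop j = (a.take j).filter (fun x => decide (e < x)) ++ (a.drop j).filter (fun x => decide (e < x)) := by
        rw [h1, h2, List.nil_append]
    _ = a.filter (fun x => decide (e < x)) := by rw [← List.filter_append, List.take_append_drop]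

lemma pv_mem_bisect (a : List Int) (e : Int) (hs : a.Pairwise (· < ·)) (he : e ∈ a) :
    PySem.List.bisectLeft a e < a.length ∧
    PySem.List.pyGetD a (PySem.List.bisectLeft a e : Int) 0 = e ∧
    a.drop (PySem.List.bisectLeft a e + 1) = a.filter (fun x => decide (e < x)) := by
  set j := PySem.List.bisectLeft a e with hj
  obtain ⟨hjle, hlt, hge⟩ := PySem.List.bisectLeft_spec a e (hs.imp le_of_lt)
  obtain ⟨i, hi, hie⟩ := List.mem_iff_getElem.mp he
  have hji : j ≤ i := by
    by_contra hcon
    have := hlt i hi (by omega)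
    omega
  have hjlen : j < a.length := lt_of_le_of_lt hji hi
  have haj : a[j] = e := by
    rcases Nat.eq_or_lt_of_le hji with h | h
    · subst h; exact hie
    · have h1 := hge j hjlen (le_refl _)
      have h2 : a[j] < a[i] := List.pairwise_iff_getElem.mp hs j i hjlen hi h
      omega
  refine ⟨hjlen, ?_, ?_⟩
  · rw [PySem.List.pyGetD_natCast, List.getD_eq_getElem?_getD, List.getElem?_eq_getElem hjlen]
    simpa using haj
  · have h1 : (a.take (j+1)).filter (fun x => decide (e < x)) = [] := by
      apply List.filter_eq_nil_iff.mpr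
      intro x hx
      obtain ⟨i', hi', rfl⟩ := List.mem_iff_getElem.mp hx
      have hi'' : i' < a.length := lt_of_lt_of_le hi' (by simp [List.length_take])
      rw [List.getElem_take]
      have hlt' : i' < j + 1 := lt_of_lt_of_le hi' (by simp [List.length_take])
      rcases Nat.lt_or_ge i' j with h | h
      · have := hlt i' hi'' h; simp; omega
      · have : i' = j := by omega
        subst this; simp [haj]
    have h2 : (a.drop (j+1)).filter (fun x => decide (e < x)) = a.drop (j+1) := by
      apply List.filter_eq_self.mpr
      intro x hx
      obtain ⟨i', hi', rfl⟩ := List.mem_iff_getElem.mp hx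
      have hji' : j + 1 + i' < a.length := by have := hi'; simp [List.length_drop] at this; omega
      rw [List.getElem_drop]
      have h2 : a[j] < a[j + 1 + i'] := List.pairwise_iff_getElem.mp hs j (j+1+i') hjlen hji' (by omega)
      rw [haj] at h2
      simpa using h2
    calc a.drop (j+1) = (a.take (j+1)).filter (fun x => decide (e < x)) ++ (a.drop (j+1)).filter (fun x => decide (e < x)) := by
          rw [h1, h2, List.nil_append]
      _ = a.filter (fun x => decide (e < x)) := by rw [← List.filter_append, List.take_append_drop]

lemma pv_not_mem_bisect (a : List Int) (e : Int) (he : e ∉ a) :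
    ¬ (PySem.List.bisectLeft a e < a.length ∧
       PySem.List.pyGetD a (PySem.List.bisectLeft a e : Int) 0 = e) := by
  rintro ⟨hlen, hget⟩
  apply he
  rw [PySem.List.pyGetD_natCast, List.getD_eq_getElem?_getD, List.getElem?_eq_getElem hlen] at hget
  simp at hget
  exact hget ▸ List.getElem_mem hlen

-- sum of 1 over a list is its length
lemma pv_ones (m : List Int) : ((m.map (fun _ => (1 : Int))).sum) = (m.length : Int) := by
  induction m with
  | nil => simp
  | cons x t ih => simp only [List.map_cons, List.sum_cons, ih, List.length_cons]; push_cast; ring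

-- one step of A, under the loop invariant, performs B's step on the ans component
lemma pv_step (l : List Int) (a : List Int) (d : PySem.Dict Int Int) (ans : Int) (k : Nat)
    (hk : k < l.length)
    (hs : a.Pairwise (· < ·))
    (hmem : ∀ v, v ∈ a ↔ v ∈ l.take k)
    (hd : ∀ v, d.getD v 0 = ((l.take k).count v : Int)) :
    ∃ a' d', pvStepA l (a, d, ans) (k : Int) = (a', d', pvStepB l ans (k : Int)) ∧
      a'.Pairwise (· < ·) ∧ (∀ v, v ∈ a' ↔ v ∈ l.take (k + 1)) ∧
      (∀ v, d'.getD v 0 = ((l.take (k + 1)).count v : Int)) := by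
  have he : PySem.List.pyGetD l (k : Int) 0 = l[k] := by
    rw [PySem.List.pyGetD_natCast]
    exact List.getD_eq_getElem l 0 hk
  set e := l[k] with hedef
  set p := l.take k with hpdef
  have hp' : l.take (k + 1) = p ++ [e] := by
    rw [List.take_add_one, hpdef, List.getElem?_eq_getElem hk]
    simp [hedef]
  have hnd : a.Nodup := hs.imp ne_of_lt
  have hsub : ∀ x ∈ p, x ∈ a := fun x hx => (hmem x).mpr hx
  have hsum_lt : ((a.filter (fun x => decide (x < e))).map (fun v => d.getD v 0)).sum
      = ((p.countP (fun x => decide (x < e)) : Nat) : Int) := by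
    simp only [hd]
    exact pv_sum_count a _ p hnd hsub
  have hsum_gt : ((a.filter (fun x => decide (e < x))).map (fun v => d.getD v 0)).sum
      = ((p.countP (fun x => decide (e < x)) : Nat) : Int) := by
    simp only [hd]
    exact pv_sum_count a _ p hnd hsub
  have hB : pvStepB l ans (k : Int) = ans +
      min ((p.countP (fun x => decide (x < e)) : Nat) : Int)
          ((p.countP (fun x => decide (e < x)) : Nat) : Int) := by
    simp only [pvStepB, he, PySem.List.slice_to_natCast, ← hpdef, gt_iff_lt]
    congr 1
    · rw [pv_ones, pv_ones]
      congr 2 <;> rw [List.countP_eq_length_filter]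
  by_cases hem : e ∈ a
  · -- e already present: j < len(a) and a[j] == e
    obtain ⟨hjlen, hjget, hdropj⟩ := pv_mem_bisect a e hs hem
    refine ⟨a, d.insert e (d.getD e 0 + 1), ?_, hs, ?_, ?_⟩
    · simp only [pvStepA, he]
      rw [if_pos ⟨hjlen, hjget⟩]
      have h1 : PySem.List.slice a none (some ((PySem.List.bisectLeft a e : Nat) : Int))
          = a.filter (fun x => decide (x < e)) := by
        rw [PySem.List.slice_to_natCast, pv_take_bisect a e hs]
      have hc : ((PySem.List.bisectLeft a e : Nat) : Int) + 1
          = ((PySem.List.bisectLeft a e + 1 : Nat) : Int) := by push_cast; ring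
      have h2 : PySem.List.slice a (some (((PySem.List.bisectLeft a e : Nat) : Int) + 1)) none
          = a.filter (fun x => decide (e < x)) := by
        rw [hc, PySem.List.slice_from_natCast, hdropj]
      rw [h1, h2, hsum_lt, hsum_gt, hB]
    · intro v
      have hep : e ∈ p := (hmem e).mp hem
      rw [hp']
      simp only [List.mem_append, List.mem_singleton]
      constructor
      · intro hv; exact Or.inl ((hmem v).mp hv)
      · rintro (hv | rfl)
        · exact (hmem v).mpr hv
        · exact hem
    · intro v
      rw [PySem.Dict.getD_insert, hp', List.count_append]
      by_cases hv : v = e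
      · subst hv
        rw [if_pos rfl, hd]
        simp
      · rw [if_neg hv, hd]
        have : List.count v [e] = 0 := by
          simp [List.count_singleton]
          exact fun h => hv h.symm
        rw [this]
        simp
  · -- e not present: insert it
    obtain ⟨hjle, -, -⟩ := PySem.List.bisectLeft_spec a e (hs.imp le_of_lt)
    have hnp : e ∉ p := fun h => hem ((hmem e).mpr h)
    have htakej := pv_take_bisect a e hs
    have hdropj := pv_drop_bisect_not_mem a e hs hem
    have hins : PySem.List.insert a ((PySem.List.bisectLeft a e : Nat) : Int) e
        = a.take (PySem.List.bisectLeft a e) ++ e :: a.drop (PySem.List.bisectLeft a e) :=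
      PySem.List.insert_natCast a _ e hjle
    have hxlt : ∀ x ∈ a.take (PySem.List.bisectLeft a e), x < e := by
      intro x hx
      rw [htakej] at hx
      simpa using (List.mem_filter.mp hx).2
    have hxgt : ∀ x ∈ a.drop (PySem.List.bisectLeft a e), e < x := by
      intro x hx
      rw [hdropj] at hx
      simpa using (List.mem_filter.mp hx).2
    refine ⟨PySem.List.insert a ((PySem.List.bisectLeft a e : Nat) : Int) e, d.insert e 1, ?_, ?_, ?_, ?_⟩
    · simp only [pvStepA, he]
      rw [if_neg (pv_not_mem_bisect a e hem)]
      have h1 : PySem.List.slice a none (some ((PySem.List.bisectLeft a e : Nat) : Int))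
          = a.filter (fun x => decide (x < e)) := by
        rw [PySem.List.slice_to_natCast, htakej]
      have h2 : PySem.List.slice a (some ((PySem.List.bisectLeft a e : Nat) : Int)) none
          = a.filter (fun x => decide (e < x)) := by
        rw [PySem.List.slice_from_natCast, hdropj]
      rw [h1, h2, hsum_lt, hsum_gt, hB]
    · rw [hins]
      apply List.pairwise_append.mpr
      refine ⟨List.Pairwise.sublist (List.take_sublist _ _) hs, ?_, ?_⟩
      · apply List.pairwise_cons.mpr
        exact ⟨hxgt, List.Pairwise.sublist (List.drop_sublist _ _) hs⟩
      · intro x hx y hy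
        rcases List.mem_cons.mp hy with rfl | hy'
        · exact hxlt x hx
        · exact lt_trans (hxlt x hx) (hxgt y hy')
    · intro v
      rw [hins, hp']
      have hsplit : v ∈ a ↔ v ∈ a.take (PySem.List.bisectLeft a e) ∨ v ∈ a.drop (PySem.List.bisectLeft a e) := by
        rw [← List.mem_append, List.take_append_drop]
      simp only [List.mem_append, List.mem_cons, List.not_mem_nil, or_false]
      constructor
      · rintro (hv | rfl | hv)
        · exact Or.inl ((hmem v).mp (hsplit.mpr (Or.inl hv)))
        · exact Or.inr rfl
        · exact Or.inl ((hmem v).mp (hsplit.mpr (Or.inr hv)))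
      · rintro (hv | rfl)
        · rcases hsplit.mp ((hmem v).mpr hv) with h | h
          · exact Or.inl h
          · exact Or.inr (Or.inr h)
        · exact Or.inr (Or.inl rfl)
    · intro v
      rw [PySem.Dict.getD_insert, hp', List.count_append]
      by_cases hv : v = e
      · subst hv
        rw [if_pos rfl]
        have h0 : List.count e p = 0 := List.count_eq_zero.mpr hnp
        simp [h0]
      · rw [if_neg hv, hd]
        have : List.count v [e] = 0 := by
          simp [List.count_singleton]
          exact fun h => hv h.symm
        rw [this]
        simp

-- the loop invariant, by induction on the number of processed indices
lemma pv_loop (l : List Int) (hl : l ≠ []) (k : Nat) (hk : 1 + k ≤ l.length) :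
    ∃ a d, (PySem.List.pyRange 1 (1 + (k : Int)) 1).foldl (pvStepA l)
        ([PySem.List.pyGetD l 0 0], PySem.Dict.ofList [(PySem.List.pyGetD l 0 0, 1)], 0)
      = (a, d, (PySem.List.pyRange 1 (1 + (k : Int)) 1).foldl (pvStepB l) 0) ∧
      a.Pairwise (· < ·) ∧ (∀ v, v ∈ a ↔ v ∈ l.take (1 + k)) ∧
      (∀ v, d.getD v 0 = ((l.take (1 + k)).count v : Int)) := by
  induction k with
  | zero =>
    have h0 : PySem.List.pyRange 1 (1 + ((0 : Nat) : Int)) 1 = [] := by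
      norm_num [PySem.List.pyRange_one_eq_nil]
    cases l with
    | nil => exact absurd rfl hl
    | cons h t =>
      refine ⟨[h], PySem.Dict.ofList [(h, 1)], ?_, ?_, ?_, ?_⟩
      · rw [h0]
        simp [PySem.List.pyGetD_zero_cons]
      · simp
      · intro v; simp
      · intro v
        have hof : PySem.Dict.ofList [(h, (1 : Int))] = PySem.Dict.mk [(h, 1)] := rfl
        rw [hof]
        simp [PySem.Dict.getD, PySem.Dict.get?_mk_cons, List.count_singleton]
        by_cases hv : h = v
        · simp [hv]
        · simp [hv, PySem.Dict.get?]
  | succ k ih =>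
    obtain ⟨a, d, heq, hs, hmem, hd⟩ := ih (by omega)
    have hkl : 1 + k < l.length := by omega
    obtain ⟨a', d', hstep, hs', hmem', hd'⟩ :=
      pv_step l a d ((PySem.List.pyRange 1 (1 + (k : Int)) 1).foldl (pvStepB l) 0) (1 + k) hkl hs hmem hd
    have hr : PySem.List.pyRange 1 (1 + ((k + 1 : Nat) : Int)) 1
        = PySem.List.pyRange 1 (1 + (k : Int)) 1 ++ [1 + (k : Int)] := by
      have hc : (1 : Int) + ((k + 1 : Nat) : Int) = (1 + (k : Int)) + 1 := by push_cast; ring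
      rw [hc, PySem.List.pyRange_one_succ_right (by omega)]
    have hcast : (1 + (k : Int)) = ((1 + k : Nat) : Int) := by push_cast; ring
    have hidx : 1 + (k + 1) = (1 + k) + 1 := by omega
    refine ⟨a', d', ?_, hs', ?_, ?_⟩
    · rw [hr, List.foldl_append, List.foldl_append, heq]
      simp only [List.foldl_cons, List.foldl_nil]
      rw [hcast]
      exact hstep
    · rw [hidx]; exact hmem'
    · rw [hidx]; exact hd'

-- ===== VERDICT (by name: the statement is the Claim_ definition above) =====
theorem createSortedArray_1_spec : Claim_equal_createSortedArray_1 := by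
  intro l _ hl
  unfold Spec_createSortedArray_1 createSortedArray_1 createSortedArray_1_alt
  obtain ⟨a, d, heq, -, -, -⟩ := pv_loop l hl (l.length - 1) (by
    have := List.length_pos_of_ne_nil hl; omega)
  have hcast : (1 : Int) + ((l.length - 1 : Nat) : Int) = (l.length : Int) := by
    have := List.length_pos_of_ne_nil hl; omega
  rw [hcast] at heq
  simp only [heq]
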